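-- pv_equiv track=rewrite | github.com/chungeun-choi/algorithms | hakrank/gridland_metro.py | gridlandMetro
-- ===== SOURCE A (Python) =====
-- def gridlandMetro(n, m, k, track):
--     track_map = {}
--     result = 0
--     for row,start,end in track:
--         if row not in track_map:
--             track_map[row] = []
--         track_map[row].append((start,end))
--
--     for row in track_map:
--         track_map[row].sort()
--         current_c2 = 0
--         sum_track_value = 0
--
--         for c1,c2 in track_map[row]:
--             if c1 <= current_c2:
--                 if c2 > current_c2:
--                     sum_track_value += c2 - current_c2
--             else:
--                 sum_track_value += c2 - c1 + 1
--             current_c2 = max(c2,current_c2)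
--         result += sum_track_value
--
--     return n * m - result
-- ===== SOURCE B (Python) =====
-- def gridlandMetro(n, m, k, track):
--     occupied = 0
--     for i, (row, c1, c2) in enumerate(track):
--         p = 0
--         for j, (r, d1, d2) in enumerate(track):
--             if r == row and ((d1, d2) < (c1, c2) or ((d1, d2) == (c1, c2) and j < i)):
--                 p = max(p, d2)
--         if c1 > p:
--             occupied += c2 - c1 + 1
--         elif c2 > p:
--             occupied += c2 - p
--     return n * m - occupied
-- ===== Notes on version B (the rewrite author's own statement) =====
-- stated objective: alternative
-- what changed: A groups tracks into a per-row dict, sorts each row's intervals and merges them with a running end pointer; B keeps no grouping, no sort and no running state: for each track entry it recomputes the covered-up-to value by a direct quadratic scan over the same-row entries that precede it in sorted order (lex-smaller pair, or equal pair earlier in the list), trading A's O(k log k) sort-and-merge for a comparison-based brute force.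
import Mathlib
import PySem

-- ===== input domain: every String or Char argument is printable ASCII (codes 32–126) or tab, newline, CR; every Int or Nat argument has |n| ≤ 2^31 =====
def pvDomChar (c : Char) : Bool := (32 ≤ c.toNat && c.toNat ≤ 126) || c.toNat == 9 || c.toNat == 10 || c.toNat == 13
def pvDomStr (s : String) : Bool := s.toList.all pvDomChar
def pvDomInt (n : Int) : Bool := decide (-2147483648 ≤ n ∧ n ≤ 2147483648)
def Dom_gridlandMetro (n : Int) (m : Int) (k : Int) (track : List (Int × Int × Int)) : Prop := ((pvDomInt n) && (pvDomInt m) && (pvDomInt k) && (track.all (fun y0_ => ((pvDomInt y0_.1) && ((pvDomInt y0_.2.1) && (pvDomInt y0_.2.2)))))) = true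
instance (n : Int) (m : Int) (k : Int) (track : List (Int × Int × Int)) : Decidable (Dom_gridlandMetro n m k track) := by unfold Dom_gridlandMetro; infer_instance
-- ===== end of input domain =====

-- B replaces A's per-row dict grouping + per-row sort + running-end merge by a brute-force
-- double scan: for each track entry it recomputes the covered-up-to bound from the same-row
-- entries that precede it in sorted order (objective: alternative algorithm, same exact value).

-- ===== PORT A =====
-- the interval-merge step of A's inner loop (state = (current_c2, sum_track_value))
def mergeStep (st : Int × Int) (c : Int × Int) : Int × Int :=
  (max c.2 st.1,
   if c.1 ≤ st.1 then (if c.2 > st.1 then st.2 + (c.2 - st.1) else st.2)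
   else st.2 + (c.2 - c.1 + 1))

def gridlandMetro (n : Int) (m : Int) (_k : Int) (track : List (Int × Int × Int)) : Int :=
  -- for row,start,end in track: if row not in track_map: track_map[row]=[]; track_map[row].append((start,end))
  let trackMap := track.foldl (fun d t => d.modify t.1 [] (fun l => l ++ [t.2])) (PySem.Dict.empty : PySem.Dict Int (List (Int × Int)))
  -- for row in track_map: track_map[row].sort(); inner merge loop; result += sum_track_value
  let result := trackMap.items.foldl
    (fun result p =>
      result + ((PySem.List.sorted2 p.2 (fun c => c.1) (fun c => c.2)).foldl mergeStep (0, 0)).2) 0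
  n * m - result

-- ===== PORT B =====
-- Python's pair tuple comparison a < b, as a Boolean
def pyLt2 (a b : Int × Int) : Bool :=
  decide (a.1 < b.1) || (!decide (b.1 < a.1) && decide (a.2 < b.2))

def gridlandMetro_alt (n : Int) (m : Int) (_k : Int) (track : List (Int × Int × Int)) : Int :=
  let e := PySem.List.enumerate track
  -- for i, (row, c1, c2) in enumerate(track): inner scan over enumerate(track), then the gap/overlap arithmetic
  let occupied := e.foldl (fun occupied it =>
    let p := e.foldl (fun p jt =>
      if jt.2.1 == it.2.1 && (pyLt2 jt.2.2 it.2.2 || (jt.2.2 == it.2.2 && decide (jt.1 < it.1)))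
      then max p jt.2.2.2 else p) 0
    if it.2.2.1 > p then occupied + (it.2.2.2 - it.2.2.1 + 1)
    else if it.2.2.2 > p then occupied + (it.2.2.2 - p) else occupied) 0
  n * m - occupied

-- ===== PRECONDITION & SPEC =====
def Spec_gridlandMetro (n : Int) (m : Int) (k : Int) (track : List (Int × Int × Int)) (out : Int) : Prop := out = gridlandMetro_alt n m k track
instance (n : Int) (m : Int) (k : Int) (track : List (Int × Int × Int)) (out : Int) : Decidable (Spec_gridlandMetro n m k track out) := by unfold Spec_gridlandMetro; infer_instance

-- ===== CLAIM (what is proved, stated in full; the proofs are below) =====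
def Claim_equal_gridlandMetro : Prop := ∀ (n : Int) (m : Int) (k : Int) (track : List (Int × Int × Int)), Dom_gridlandMetro n m k track → Spec_gridlandMetro n m k track (gridlandMetro n m k track)

-- ===== LEMMAS AND PROOFS =====

-- contribution of one interval given the covered-up-to bound p (the if-block both Pythons share)
def gfun (x : Int × Int) (p : Int) : Int :=
  if x.1 ≤ p then (if x.2 > p then x.2 - p else 0) else x.2 - x.1 + 1

lemma mergeStep_eq (st : Int × Int) (c : Int × Int) :
    mergeStep st c = (max c.2 st.1, st.2 + gfun c st.1) := by
  simp only [mergeStep, gfun]; split_ifs <;> simp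

-- decorated pair = (original index, (c1, c2)); strict total order when indices differ
def ltD (a b : Int × Int × Int) : Bool :=
  pyLt2 a.2 b.2 || (a.2 == b.2 && decide (a.1 < b.1))

def dec (f : Int × Int × Int × Int) : Int × Int × Int := (f.1, f.2.2)

-- max of the c2 components of a decorated list, floored at 0
def MXD (l : List (Int × Int × Int)) : Int := l.foldl (fun p f => max p f.2.2) 0

-- A's inner merge loop as a function of the start bound
def csum (l : List (Int × Int)) (c : Int) : Int := (l.foldl mergeStep (c, 0)).2

-- per-row value both programs compute
def rowVal (track : List (Int × Int × Int)) (r : Int) : Int :=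
  ((PySem.List.sorted2 ((track.filter (fun t => t.1 == r)).map (fun t => t.2))
      (fun c => c.1) (fun c => c.2)).foldl mergeStep (0, 0)).2

-- basic facts about ltD
lemma ltD_irrefl (a : Int × Int × Int) : ltD a a = false := by
  obtain ⟨i, x1, x2⟩ := a; simp [ltD, pyLt2]

lemma ltD_asymm (a b : Int × Int × Int) : ltD a b = true → ltD b a = false := by
  obtain ⟨i, a1, a2⟩ := a; obtain ⟨j, b1, b2⟩ := b
  simp [ltD, pyLt2, Prod.ext_iff]; omega

lemma ltD_trans (a b c : Int × Int × Int) :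
    ltD a b = true → ltD b c = true → ltD a c = true := by
  obtain ⟨i, a1, a2⟩ := a; obtain ⟨j, b1, b2⟩ := b; obtain ⟨l, c1, c2⟩ := c
  simp [ltD, pyLt2, Prod.ext_iff]; omega

lemma ltD_total (a b : Int × Int × Int) (h : a.1 ≠ b.1) :
    ltD a b = true ∨ ltD b a = true := by
  obtain ⟨i, a1, a2⟩ := a; obtain ⟨j, b1, b2⟩ := b
  simp only [ne_eq] at h
  simp [ltD, pyLt2, Prod.ext_iff]; omega

-- insertion-sort structure (generic in the Bool comparison `before`)
lemma insertBy_perm {α : Type} (before : α → α → Bool) (x : α) (ys : List α) :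
    (PySem.List.insertBy before x ys).Perm (x :: ys) := by
  induction ys with
  | nil => simp [PySem.List.insertBy]
  | cons y ys ih =>
    simp only [PySem.List.insertBy]
    split
    · exact List.Perm.refl _
    · exact ((ih.cons y).trans (List.Perm.swap x y ys))

lemma foldl_insertBy_perm {α : Type} (before : α → α → Bool) (xs : List α) :
    ∀ acc : List α, (xs.foldl (fun acc t => PySem.List.insertBy before t acc) acc).Perm (acc ++ xs) := by
  induction xs with
  | nil => intro acc; simp
  | cons x xs ih =>
    intro acc
    refine (ih (PySem.List.insertBy before x acc)).trans ?_
    refine (((insertBy_perm before x acc).append_right xs).trans ?_)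
    exact (List.perm_middle (a := x) (l₁ := acc) (l₂ := xs)).symm

lemma pairwise_insertBy {α : Type} (before : α → α → Bool)
    (hA : ∀ a b, before a b = true → before b a = false)
    (hT : ∀ a b c, before a b = true → before b c = true → before a c = true)
    (x : α) (ys : List α) (h : ys.Pairwise (fun a b => before b a = false)) :
    (PySem.List.insertBy before x ys).Pairwise (fun a b => before b a = false) := by
  induction ys with
  | nil => simp [PySem.List.insertBy]
  | cons y ys ih =>
    rcases List.pairwise_cons.mp h with ⟨hy, hys⟩
    simp only [PySem.List.insertBy]
    by_cases hxy : before x y = true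
    · simp only [hxy, if_true]
      refine List.pairwise_cons.mpr ⟨?_, h⟩
      intro z hz
      rcases List.mem_cons.mp hz with rfl | hz
      · exact hA _ _ hxy
      · by_contra hzx
        have : before z x = true := by
          cases hbx : before z x with
          | true => rfl
          | false => exact absurd hbx hzx
        exact absurd (hT _ _ _ this hxy) (by simp [hy z hz])
    · simp only [hxy, if_false, Bool.false_eq_true]
      refine List.pairwise_cons.mpr ⟨?_, ih hys⟩
      intro w hw
      rcases (PySem.List.mem_insertBy before x w ys).mp hw with rfl | hw
      · simpa using hxy
      · exact hy w hw

lemma pairwise_foldl_insertBy {α : Type} (before : α → α → Bool)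
    (hA : ∀ a b, before a b = true → before b a = false)
    (hT : ∀ a b c, before a b = true → before b c = true → before a c = true)
    (xs : List α) :
    ∀ acc, acc.Pairwise (fun a b => before b a = false) →
    (xs.foldl (fun acc t => PySem.List.insertBy before t acc) acc).Pairwise
      (fun a b => before b a = false) := by
  induction xs with
  | nil => exact fun acc h => h
  | cons x xs ih => exact fun acc h => ih _ (pairwise_insertBy before hA hT x acc h)

-- erasing the index decoration from the decorated insertion sort
lemma insertBy_map_snd_idx (x : Int × Int × Int) (acc : List (Int × Int × Int))
    (h : ∀ y ∈ acc, y.1 < x.1) :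
    (PySem.List.insertBy ltD x acc).map (fun t => t.2) =
      PySem.List.insertBy pyLt2 x.2 (acc.map (fun t => t.2)) := by
  induction acc with
  | nil => simp [PySem.List.insertBy]
  | cons y ys ih =>
    have hy : y.1 < x.1 := h y List.mem_cons_self
    have hlt : ltD x y = pyLt2 x.2 y.2 := by
      simp [ltD]
      intro _; omega
    simp only [PySem.List.insertBy, List.map_cons, hlt]
    by_cases hc : pyLt2 x.2 y.2 = true
    · simp [hc]
    · simp only [Bool.not_eq_true] at hc
      simp [hc, ih (fun z hz => h z (List.mem_cons_of_mem y hz))]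

lemma foldl_insertBy_map_snd_idx (dl : List (Int × Int × Int))
    (hinc : dl.Pairwise (fun a b => a.1 < b.1)) :
    ∀ acc, (∀ d ∈ dl, ∀ a ∈ acc, a.1 < d.1) →
    (dl.foldl (fun acc t => PySem.List.insertBy ltD t acc) acc).map (fun t => t.2) =
      (dl.map (fun t => t.2)).foldl (fun acc c => PySem.List.insertBy pyLt2 c acc)
        (acc.map (fun t => t.2)) := by
  induction dl with
  | nil => intro acc _; rfl
  | cons x xs ih =>
    intro acc hacc
    rcases List.pairwise_cons.mp hinc with ⟨hx, hxs⟩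
    have hstep := insertBy_map_snd_idx x acc (hacc x List.mem_cons_self)
    have hmem : ∀ d ∈ xs, ∀ a ∈ PySem.List.insertBy ltD x acc, a.1 < d.1 := by
      intro d hd a ha
      rcases (PySem.List.mem_insertBy ltD x a acc).mp ha with rfl | ha
      · exact hx d hd
      · exact hacc d (List.mem_cons_of_mem x hd) a ha
    simp only [List.foldl_cons, List.map_cons, ih hxs _ hmem, hstep]

-- the accumulator of the merge fold is additive
lemma mergeFold_shift (ps : List (Int × Int)) :
    ∀ c a, ps.foldl mergeStep (c, a) =
      ((ps.foldl mergeStep (c, 0)).1, a + (ps.foldl mergeStep (c, 0)).2) := by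
  induction ps with
  | nil => intro c a; simp
  | cons p ps ih =>
    intro c a
    have hstep : ∀ b, mergeStep (c, b) p = ((mergeStep (c, 0) p).1, b + (mergeStep (c, 0) p).2) := by
      intro b
      simp only [mergeStep]
      split_ifs <;> simp
    rw [List.foldl_cons, List.foldl_cons, hstep a]
    rw [ih (mergeStep (c, 0) p).1 (a + (mergeStep (c, 0) p).2)]
    conv_rhs => rw [show mergeStep (c, 0) p = ((mergeStep (c, 0) p).1, (mergeStep (c, 0) p).2) from rfl,
      ih (mergeStep (c, 0) p).1 (mergeStep (c, 0) p).2]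
    simp only [Prod.mk.injEq, true_and]
    ring

lemma csum_cons (x : Int × Int) (t : List (Int × Int)) (c : Int) :
    csum (x :: t) c = gfun x c + csum t (max x.2 c) := by
  simp only [csum, List.foldl_cons, mergeStep_eq]
  rw [mergeFold_shift t (max x.2 c) (0 + gfun x c)]
  simp [add_comm]

lemma MXD_append_singleton (a : List (Int × Int × Int)) (e : Int × Int × Int) :
    MXD (a ++ [e]) = max (MXD a) e.2.2 := by
  simp [MXD]

lemma MXD_perm {l l' : List (Int × Int × Int)} (h : l.Perm l') : MXD l = MXD l' := by
  unfold MXD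
  exact h.foldl_eq' (by
    intro x _ y _ z
    rw [max_assoc, max_comm x.2.2, ← max_assoc]) 0

-- the central positional lemma: summing each element's contribution with the max over its
-- strict ltD-predecessors, along a ltD-sorted list, is exactly A's merge fold
lemma dseq : ∀ (qs pre : List (Int × Int × Int)),
    ((pre ++ qs).Pairwise (fun a b => ltD a b = true)) →
    (qs.map (fun e => gfun e.2 (MXD ((pre ++ qs).filter (fun f => ltD f e))))).sum
      = csum (qs.map (fun t => t.2)) (MXD pre) := by
  intro qs
  induction qs with
  | nil => intro pre _; simp [csum]
  | cons e t ih =>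
    intro pre hp
    have hpre : ∀ p ∈ pre, ltD p e = true := by
      intro p hpm
      exact (List.pairwise_append.mp hp).2.2 p hpm e List.mem_cons_self
    have het : ∀ f ∈ e :: t, ltD f e = false := by
      intro f hf
      rcases List.mem_cons.mp hf with rfl | hf
      · exact ltD_irrefl f
      · exact ltD_asymm _ _ ((List.pairwise_cons.mp (List.pairwise_append.mp hp).2.1).1 f hf)
    have hfilter : (pre ++ e :: t).filter (fun f => ltD f e) = pre := by
      rw [List.filter_append, List.filter_eq_self.mpr hpre,
        List.filter_eq_nil_iff.mpr (by intro f hf; simp [het f hf]), List.append_nil]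
    have hassoc : pre ++ e :: t = (pre ++ [e]) ++ t := by simp
    have hp' : ((pre ++ [e]) ++ t).Pairwise (fun a b => ltD a b = true) := by
      rw [← hassoc]; exact hp
    have hIH := ih (pre ++ [e]) hp'
    simp only [List.map_cons, List.sum_cons, hfilter, csum_cons]
    have hre : (t.map (fun e' => gfun e'.2 (MXD ((pre ++ e :: t).filter (fun f => ltD f e'))))).sum
        = (t.map (fun e' => gfun e'.2 (MXD (((pre ++ [e]) ++ t).filter (fun f => ltD f e'))))).sum := by
      rw [hassoc]
    rw [hre, hIH, MXD_append_singleton, max_comm]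

-- the double-scan sum is invariant under permuting the decorated list
lemma ds_perm (dm dm' : List (Int × Int × Int)) (h : dm.Perm dm') :
    (dm.map (fun e => gfun e.2 (MXD (dm.filter (fun f => ltD f e))))).sum =
    (dm'.map (fun e => gfun e.2 (MXD (dm'.filter (fun f => ltD f e))))).sum := by
  have hfun : (fun e => gfun e.2 (MXD (dm.filter (fun f => ltD f e)))) =
      (fun e => gfun e.2 (MXD (dm'.filter (fun f => ltD f e)))) := by
    funext e
    rw [MXD_perm (h.filter _)]
  rw [hfun]
  exact (h.map _).sum_eq

-- the decorated insertion sort of an index-increasing list is strictly ltD-sorted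
lemma sorted_pairwise_ltD (pm : List (Int × Int × Int))
    (hinc : pm.Pairwise (fun a b => a.1 < b.1)) :
    (pm.foldl (fun acc x => PySem.List.insertBy ltD x acc) []).Pairwise
      (fun a b => ltD a b = true) := by
  have hps := pairwise_foldl_insertBy ltD ltD_asymm ltD_trans pm [] List.Pairwise.nil
  have hperm := foldl_insertBy_perm ltD pm []
  simp only [List.nil_append] at hperm
  have hne : (pm.foldl (fun acc x => PySem.List.insertBy ltD x acc) []).Pairwise
      (fun a b => a.1 ≠ b.1) := by
    refine (List.Perm.pairwise_iff ?_ hperm).mpr (hinc.imp (by intro a b h; omega))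
    intro a b h; omega
  refine (hps.and hne).imp ?_
  rintro a b ⟨h1, h2⟩
  rcases ltD_total a b h2 with h | h
  · exact h
  · rw [h1] at h; cases h

-- partition of a list into its key-classes, over a nodup complete key list
lemma flatMap_perm_of_forall {α β : Type} (l : List α) (f g : α → List β)
    (h : ∀ a ∈ l, (f a).Perm (g a)) : (l.flatMap f).Perm (l.flatMap g) := by
  induction l with
  | nil => simp
  | cons a l ih =>
    simp only [List.flatMap_cons]
    exact (h a List.mem_cons_self).append (ih (fun b hb => h b (List.mem_cons_of_mem a hb)))

lemma filter_partition_perm {α : Type} (key : α → Int) :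
    ∀ (rs : List Int) (l : List α), rs.Nodup → (∀ t ∈ l, key t ∈ rs) →
    (rs.flatMap (fun r => l.filter (fun t => key t == r))).Perm l := by
  intro rs
  induction rs with
  | nil =>
    intro l _ h
    have : l = [] := List.eq_nil_iff_forall_not_mem.mpr (fun t ht => by simpa using h t ht)
    simp [this]
  | cons r rs ih =>
    intro l hnd h
    rcases List.nodup_cons.mp hnd with ⟨hrns, hnd'⟩
    simp only [List.flatMap_cons]
    have hstep : (rs.flatMap (fun r' => l.filter (fun t => key t == r'))).Perm
        (rs.flatMap (fun r' => (l.filter (fun t => !(key t == r))).filter (fun t => key t == r'))) := by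
      refine flatMap_perm_of_forall rs _ _ ?_
      intro r' hr'
      have hr'ne : r' ≠ r := fun hEq => hrns (hEq ▸ hr')
      have : (l.filter (fun t => !(key t == r))).filter (fun t => key t == r') =
          l.filter (fun t => key t == r') := by
        rw [List.filter_filter]
        apply List.filter_congr
        intro t _
        by_cases ht : key t = r'
        · simp [ht, hr'ne]
        · simp [ht]
      rw [this]
    have hrest : (rs.flatMap (fun r' => (l.filter (fun t => !(key t == r))).filter
        (fun t => key t == r'))).Perm (l.filter (fun t => !(key t == r))) := by
      refine ih _ hnd' ?_
      intro t ht
      have htl := List.of_mem_filter ht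
      have htmem := List.mem_of_mem_filter ht
      have : key t ∈ r :: rs := h t htmem
      rcases List.mem_cons.mp this with hEq | hm
      · exfalso; simp [hEq] at htl
      · exact hm
    exact (List.Perm.append_left _ (hstep.trans hrest)).trans (List.filter_append_perm _ l)

lemma sum_map_flatMap {α β : Type} (l : List α) (f : α → List β) (h : β → Int) :
    ((l.flatMap f).map h).sum = (l.map (fun a => ((f a).map h).sum)).sum := by
  induction l with
  | nil => simp
  | cons a l ih => simp [List.flatMap_cons, ih]

lemma sorted2_eq_foldl (X : List (Int × Int)) :
    PySem.List.sorted2 X (fun c => c.1) (fun c => c.2) =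
      X.foldl (fun acc c => PySem.List.insertBy pyLt2 c acc) [] := rfl

-- A's result as a sum over the distinct rows
lemma A_eq_sum (n m k : Int) (track : List (Int × Int × Int)) :
    gridlandMetro n m k track =
      n * m - ((PySem.Set.ofList (track.map (fun t => t.1))).map (rowVal track)).sum := by
  simp only [gridlandMetro]
  congr 1
  have hnd : (track.foldl (fun d t => d.modify t.1 [] (fun l => l ++ [t.2]))
      (PySem.Dict.empty : PySem.Dict Int (List (Int × Int)))).keys.Nodup :=
    PySem.Dict.nodup_keys_foldl_modify_key track (fun t => t.1) [] (fun _ t l => l ++ [t.2])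
      PySem.Dict.empty (by rw [PySem.Dict.keys_empty]; exact List.nodup_nil)
  rw [PySem.Dict.items_eq_map_keys _ hnd []]
  rw [PySem.List.foldl_add (g := fun p : Int × List (Int × Int) =>
    ((PySem.List.sorted2 p.2 (fun c => c.1) (fun c => c.2)).foldl mergeStep (0, 0)).2)]
  rw [List.map_map]
  have hkeys : (track.foldl (fun d t => d.modify t.1 [] (fun l => l ++ [t.2]))
      (PySem.Dict.empty : PySem.Dict Int (List (Int × Int)))).keys =
      PySem.Set.ofList (track.map (fun t => t.1)) := by
    rw [PySem.Dict.keys_foldl_modify_key track (fun t => t.1) [] (fun _ t l => l ++ [t.2])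
      PySem.Dict.empty, PySem.Dict.keys_empty]
    rfl
  rw [hkeys]
  rw [List.map_congr_left (f := _) (g := rowVal track) ?_]
  · simp
  · intro r _
    have hgetD : (track.foldl (fun d t => d.modify t.1 [] (fun l => l ++ [t.2]))
        (PySem.Dict.empty : PySem.Dict Int (List (Int × Int)))).getD r [] =
        (track.filter (fun t => t.1 == r)).map (fun t => t.2) := by
      have := PySem.Dict.getD_foldl_modify_append track PySem.Dict.empty r
      simpa [PySem.Dict.getD_empty] using this
    simp only [Function.comp_apply, hgetD, rowVal]

-- B's per-row sum equals A's per-row merge value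
lemma row_block_eq (track : List (Int × Int × Int)) (r : Int) :
    let E := PySem.List.enumerate track
    let Er := E.filter (fun f => f.2.1 == r)
    ((Er.map dec).map (fun e => gfun e.2 (MXD ((Er.map dec).filter (fun f => ltD f e))))).sum
      = rowVal track r := by
  intro E Er
  have hinc : (Er.map dec).Pairwise (fun a b => a.1 < b.1) := by
    refine List.pairwise_map.mpr ?_
    exact (PySem.List.pairwise_lt_enumerate track 0).filter _
  set pm := Er.map dec with hpm
  set qs := pm.foldl (fun acc x => PySem.List.insertBy ltD x acc) [] with hqs
  have hperm : qs.Perm pm := by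
    simpa using foldl_insertBy_perm ltD pm []
  have hsorted := sorted_pairwise_ltD pm hinc
  have h1 := ds_perm pm qs hperm.symm
  have h2 := dseq qs [] (by simpa using hsorted)
  simp only [List.nil_append] at h2
  have hmxdnil : MXD ([] : List (Int × Int × Int)) = 0 := rfl
  rw [h1, h2, hmxdnil]
  -- erase the decoration from the sorted list
  have herase : qs.map (fun t => t.2) =
      (pm.map (fun t => t.2)).foldl (fun acc c => PySem.List.insertBy pyLt2 c acc) [] := by
    simpa using foldl_insertBy_map_snd_idx pm hinc [] (by intro d _ a ha; cases ha)
  -- pm's pairs are the row's pairs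
  have hpairs : pm.map (fun t => t.2) = (track.filter (fun t => t.1 == r)).map (fun t => t.2) := by
    rw [hpm, List.map_map]
    have hd : ((fun t : Int × Int × Int => t.2) ∘ dec) = fun f : Int × Int × Int × Int => f.2.2 := rfl
    rw [hd]
    have hcomm : Er.map (fun f => f.2.2) = ((Er.map (fun f => f.2)).map (fun t => t.2)) := by
      rw [List.map_map]; rfl
    rw [hcomm]
    have hsnd : Er.map (fun f => f.2) = track.filter (fun t => t.1 == r) := by
      have : Er = E.filter (fun f => (fun t : Int × Int × Int => t.1 == r) f.2) := rfl
      rw [this]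
      rw [show E.filter (fun f => (fun t : Int × Int × Int => t.1 == r) f.2) =
        E.filter ((fun t : Int × Int × Int => t.1 == r) ∘ (fun f => f.2)) from rfl]
      rw [← List.filter_map]
      rw [show E.map (fun f => f.2) = track from PySem.List.map_snd_enumerate track 0]
    rw [hsnd]
  rw [herase, hpairs, rowVal, sorted2_eq_foldl]
  rfl

-- B's result as the sum of the per-row values
lemma B_eq_sum (n m k : Int) (track : List (Int × Int × Int)) :
    gridlandMetro_alt n m k track =
      n * m - ((PySem.Set.ofList (track.map (fun t => t.1))).map (rowVal track)).sum := by
  simp only [gridlandMetro_alt]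
  congr 1
  set E := PySem.List.enumerate track with hE
  -- the outer fold is a sum of per-element terms
  have houter : (E.foldl (fun occupied it =>
      let p := E.foldl (fun p jt =>
        if jt.2.1 == it.2.1 && (pyLt2 jt.2.2 it.2.2 || (jt.2.2 == it.2.2 && decide (jt.1 < it.1)))
        then max p jt.2.2.2 else p) 0
      if it.2.2.1 > p then occupied + (it.2.2.2 - it.2.2.1 + 1)
      else if it.2.2.2 > p then occupied + (it.2.2.2 - p) else occupied) 0) =
      (E.map (fun it => gfun it.2.2 (E.foldl (fun p jt =>
        if jt.2.1 == it.2.1 && (pyLt2 jt.2.2 it.2.2 || (jt.2.2 == it.2.2 && decide (jt.1 < it.1)))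
        then max p jt.2.2.2 else p) 0))).sum := by
    have hfun : (fun (occupied : Int) (it : Int × Int × Int × Int) =>
        let p := E.foldl (fun p jt =>
          if jt.2.1 == it.2.1 && (pyLt2 jt.2.2 it.2.2 || (jt.2.2 == it.2.2 && decide (jt.1 < it.1)))
          then max p jt.2.2.2 else p) 0
        if it.2.2.1 > p then occupied + (it.2.2.2 - it.2.2.1 + 1)
        else if it.2.2.2 > p then occupied + (it.2.2.2 - p) else occupied) =
        (fun occupied it => occupied + gfun it.2.2 (E.foldl (fun p jt =>
          if jt.2.1 == it.2.1 && (pyLt2 jt.2.2 it.2.2 || (jt.2.2 == it.2.2 && decide (jt.1 < it.1)))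
          then max p jt.2.2.2 else p) 0)) := by
      funext occupied it
      simp only [gfun]
      split_ifs <;> omega
    rw [hfun, PySem.List.foldl_add, zero_add]
  rw [houter]
  -- rewrite each inner scan as MXD of a decorated filter
  have hscan : ∀ it : Int × Int × Int × Int,
      (E.foldl (fun p jt =>
        if jt.2.1 == it.2.1 && (pyLt2 jt.2.2 it.2.2 || (jt.2.2 == it.2.2 && decide (jt.1 < it.1)))
        then max p jt.2.2.2 else p) 0) =
      MXD ((E.filter (fun jt => jt.2.1 == it.2.1 && ltD (dec jt) (dec it))).map dec) := by
    intro it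
    rw [PySem.List.foldl_if_eq_foldl_filter]
    rw [MXD, List.foldl_map]
    rfl
  simp only [hscan]
  -- partition the sum into row blocks
  set rows := PySem.Set.ofList (track.map (fun t => t.1)) with hrows
  have hndrows : rows.Nodup := PySem.Set.nodup_ofList _
  have hcomplete : ∀ f ∈ E, f.2.1 ∈ rows := by
    intro f hf
    rw [hrows, PySem.Set.mem_ofList]
    refine List.mem_map.mpr ⟨f.2, ?_, rfl⟩
    have : f.2 ∈ E.map (fun f => f.2) := List.mem_map_of_mem hf
    rwa [hE, PySem.List.map_snd_enumerate track 0] at this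
  have hpart := filter_partition_perm (fun f : Int × Int × Int × Int => f.2.1) rows E hndrows hcomplete
  rw [← (hpart.map _).sum_eq, sum_map_flatMap]
  -- per-row: reduce to row_block_eq
  have hrow : ∀ r ∈ rows,
      (((E.filter (fun f => f.2.1 == r)).map (fun it => gfun it.2.2
        (MXD ((E.filter (fun jt => jt.2.1 == it.2.1 && ltD (dec jt) (dec it))).map dec)))).sum)
      = rowVal track r := by
    intro r _
    have hblock := row_block_eq track r
    simp only at hblock
    rw [← hblock]
    set Er := E.filter (fun f => f.2.1 == r) with hEr
    -- each element's scan filter collapses to a filter of its own row block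
    have hterm : ∀ it ∈ Er,
        (E.filter (fun jt => jt.2.1 == it.2.1 && ltD (dec jt) (dec it))).map dec =
        (Er.map dec).filter (fun f => ltD f (dec it)) := by
      intro it hit
      have hitr : it.2.1 = r := by
        have := List.of_mem_filter hit
        simpa using this
      have h1 : E.filter (fun jt => jt.2.1 == it.2.1 && ltD (dec jt) (dec it)) =
          Er.filter (fun jt => ltD (dec jt) (dec it)) := by
        rw [hEr, List.filter_filter]
        apply List.filter_congr
        intro jt _
        rw [hitr]
        rw [Bool.and_comm]
      rw [h1]
      rw [hEr]
      rw [show (fun jt : Int × Int × Int × Int => ltD (dec jt) (dec it)) =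
        ((fun f => ltD f (dec it)) ∘ dec) from rfl]
      rw [← List.filter_map]
    have hmap : Er.map (fun it => gfun it.2.2
        (MXD ((E.filter (fun jt => jt.2.1 == it.2.1 && ltD (dec jt) (dec it))).map dec))) =
        Er.map (fun it => gfun it.2.2 (MXD ((Er.map dec).filter (fun f => ltD f (dec it))))) := by
      apply List.map_congr_left
      intro it hit
      rw [hterm it hit]
    rw [hmap]
    rw [show Er.map (fun it => gfun it.2.2 (MXD ((Er.map dec).filter (fun f => ltD f (dec it))))) =
      (Er.map dec).map (fun e => gfun e.2 (MXD ((Er.map dec).filter (fun f => ltD f e)))) from by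
        rw [List.map_map]; rfl]
  exact congrArg List.sum (List.map_congr_left hrow)

-- ===== VERDICT (by name: the statement is the Claim_ definition above) =====
theorem gridlandMetro_spec : Claim_equal_gridlandMetro := by
  intro n m k track _
  show gridlandMetro n m k track = gridlandMetro_alt n m k track
  rw [A_eq_sum, B_eq_sum]
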